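-- pv_equiv track=rewrite | github.com/NLPWM-WHU/BRIDGE | pmi.py | count_word_and_class
-- ===== SOURCE A (Python) =====
-- def count_word_and_class(sentences, total_cnt, word_cnt, class_cnt, class_word_cnt):
--     for sentence in sentences:
--         # total sentence N
--         total_cnt += 1
--
--         # class cnt N(a)
--         class_cnt += 1
--
--         words = sentence.strip().split()
--         words = list(set(words))
--
--         for word in words:
--
--             # single word cnt N(w)
--             if word not in word_cnt:
--                 word_cnt[word] = 1
--             else:
--                 word_cnt[word] += 1
--
--             if word not in class_word_cnt:
--                 class_word_cnt[word] = 1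
--             else:
--                 class_word_cnt[word] += 1
--
--     return  total_cnt, word_cnt, class_cnt, class_word_cnt
-- ===== SOURCE B (Python) =====
-- def count_word_and_class(sentences, total_cnt, word_cnt, class_cnt, class_word_cnt):
--     # Phase 1: one pass over the sentences, counting them and aggregating
--     # per-word sentence frequencies into a single local counter dict.
--     n = 0
--     counts = {}
--     for sentence in sentences:
--         n += 1
--         for w in set(sentence.strip().split()):
--             counts[w] = counts.get(w, 0) + 1
--     # Phase 2: merge the aggregated counts into the caller's dicts.
--     for w, c in counts.items():
--         word_cnt[w] = word_cnt.get(w, 0) + c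
--         class_word_cnt[w] = class_word_cnt.get(w, 0) + c
--     return total_cnt + n, word_cnt, class_cnt + n, class_word_cnt
-- ===== Notes on version B (the rewrite author's own statement) =====
-- stated objective: alternative
-- what changed: A interleaves both dict updates word-by-word inside the sentence loop; B counts sentences and aggregates per-word sentence frequencies into one local counter in a first pass, then merges that counter into the caller's two dicts in a second pass with get-based additions (also works when sentences is a one-shot iterable, since len() is never used).
import Mathlib
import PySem

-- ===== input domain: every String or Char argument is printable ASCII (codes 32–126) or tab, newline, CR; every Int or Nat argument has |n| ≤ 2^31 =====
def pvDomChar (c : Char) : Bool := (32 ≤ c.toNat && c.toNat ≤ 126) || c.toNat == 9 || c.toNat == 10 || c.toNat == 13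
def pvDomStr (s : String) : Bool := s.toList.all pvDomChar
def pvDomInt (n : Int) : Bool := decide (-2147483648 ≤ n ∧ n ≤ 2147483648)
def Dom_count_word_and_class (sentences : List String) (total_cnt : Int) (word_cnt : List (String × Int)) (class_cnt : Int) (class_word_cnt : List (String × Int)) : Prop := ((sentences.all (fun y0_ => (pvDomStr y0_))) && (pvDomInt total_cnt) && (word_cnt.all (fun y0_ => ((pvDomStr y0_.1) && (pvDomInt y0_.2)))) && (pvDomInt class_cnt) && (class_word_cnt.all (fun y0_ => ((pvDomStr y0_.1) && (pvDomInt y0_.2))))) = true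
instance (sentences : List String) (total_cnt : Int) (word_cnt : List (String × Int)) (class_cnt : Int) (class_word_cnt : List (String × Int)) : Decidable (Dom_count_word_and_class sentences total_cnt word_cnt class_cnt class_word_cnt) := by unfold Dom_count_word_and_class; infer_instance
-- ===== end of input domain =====

-- ===== PORT A =====
-- B restructures A's single interleaved loop into aggregate-then-merge; return-value equivalence only:
-- both Pythons mutate word_cnt/class_word_cnt in place (B adds per-word totals, A adds 1 at a time).
-- Shared helper: the distinct words of a sentence, list(set(sentence.strip().split())).
def pvWords (s : String) : List String :=
  PySem.Set.ofList (PySem.Str.split₀ (PySem.Str.strip s))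

def count_word_and_class (sentences : List String) (total_cnt : Int) (word_cnt : List (String × Int)) (class_cnt : Int) (class_word_cnt : List (String × Int)) : Int × (List (String × Int)) × Int × (List (String × Int)) :=
  let st := sentences.foldl
    (fun (st : Int × PySem.Dict String Int × Int × PySem.Dict String Int) sentence =>
      let total_cnt := st.1 + 1
      let class_cnt := st.2.2.1 + 1
      let words := pvWords sentence
      let p := words.foldl
        (fun (p : PySem.Dict String Int × PySem.Dict String Int) word =>
          ((match p.1.get? word with
            | none => p.1.insert word 1
            | some v => p.1.insert word (v + 1)),
           (match p.2.get? word with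
            | none => p.2.insert word 1
            | some v => p.2.insert word (v + 1))))
        (st.2.1, st.2.2.2)
      (total_cnt, p.1, class_cnt, p.2))
    (total_cnt, PySem.Dict.mk word_cnt, class_cnt, PySem.Dict.mk class_word_cnt)
  (st.1, st.2.1.items, st.2.2.1, st.2.2.2.items)

-- ===== PORT B =====
def count_word_and_class_alt (sentences : List String) (total_cnt : Int) (word_cnt : List (String × Int)) (class_cnt : Int) (class_word_cnt : List (String × Int)) : Int × (List (String × Int)) × Int × (List (String × Int)) :=
  -- Phase 1: count the sentences and aggregate per-word sentence frequencies into one counter.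
  let acc := sentences.foldl
    (fun (acc : Int × PySem.Dict String Int) sentence =>
      (acc.1 + 1,
       (pvWords sentence).foldl (fun c w => c.insert w (c.getD w 0 + 1)) acc.2))
    (0, PySem.Dict.empty)
  -- Phase 2: merge the counter into the caller's two dicts.
  let merged := acc.2.items.foldl
    (fun (p : PySem.Dict String Int × PySem.Dict String Int) kv =>
      (p.1.insert kv.1 (p.1.getD kv.1 0 + kv.2),
       p.2.insert kv.1 (p.2.getD kv.1 0 + kv.2)))
    (PySem.Dict.mk word_cnt, PySem.Dict.mk class_word_cnt)
  (total_cnt + acc.1, merged.1.items, class_cnt + acc.1, merged.2.items)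

-- ===== PRECONDITION & SPEC =====
-- Pre_ only requires the two association lists to have distinct keys, i.e. to actually represent
-- Python dicts (every dict A accepts maps to such a list; no input of A is excluded).
def Pre_count_word_and_class (sentences : List String) (total_cnt : Int) (word_cnt : List (String × Int)) (class_cnt : Int) (class_word_cnt : List (String × Int)) : Prop :=
  (word_cnt.map Prod.fst).Nodup ∧ (class_word_cnt.map Prod.fst).Nodup
instance (sentences : List String) (total_cnt : Int) (word_cnt : List (String × Int)) (class_cnt : Int) (class_word_cnt : List (String × Int)) : Decidable (Pre_count_word_and_class sentences total_cnt word_cnt class_cnt class_word_cnt) := by unfold Pre_count_word_and_class; infer_instance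
def pvWitness_count_word_and_class : List String × Int × (List (String × Int)) × Int × (List (String × Int)) :=
  (["a b", " b "], 3, [("b", 2)], 0, [])
def Spec_count_word_and_class (sentences : List String) (total_cnt : Int) (word_cnt : List (String × Int)) (class_cnt : Int) (class_word_cnt : List (String × Int)) (out : Int × (List (String × Int)) × Int × (List (String × Int))) : Prop := out = count_word_and_class_alt sentences total_cnt word_cnt class_cnt class_word_cnt
instance (sentences : List String) (total_cnt : Int) (word_cnt : List (String × Int)) (class_cnt : Int) (class_word_cnt : List (String × Int)) (out : Int × (List (String × Int)) × Int × (List (String × Int))) : Decidable (Spec_count_word_and_class sentences total_cnt word_cnt class_cnt class_word_cnt out) := by unfold Spec_count_word_and_class; infer_instance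

-- ===== CLAIM (what is proved, stated in full; the proofs are below) =====
def Claim_equal_count_word_and_class : Prop := ∀ (sentences : List String) (total_cnt : Int) (word_cnt : List (String × Int)) (class_cnt : Int) (class_word_cnt : List (String × Int)), Dom_count_word_and_class sentences total_cnt word_cnt class_cnt class_word_cnt → Pre_count_word_and_class sentences total_cnt word_cnt class_cnt class_word_cnt → Spec_count_word_and_class sentences total_cnt word_cnt class_cnt class_word_cnt (count_word_and_class sentences total_cnt word_cnt class_cnt class_word_cnt)

-- ===== LEMMAS AND PROOFS =====

-- A's branch on `word not in word_cnt` is the single getD-based increment.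
theorem pv_body_eq (d : PySem.Dict String Int) (w : String) :
    (match d.get? w with
      | none => d.insert w 1
      | some v => d.insert w (v + 1)) = d.insert w (d.getD w 0 + 1) := by
  cases h : d.get? w with
  | none => simp [PySem.Dict.getD_of_get?_eq_none _ _ h]
  | some v => simp [PySem.Dict.getD_of_get?_eq_some _ _ h]

-- A's outer loop, split into its four independent accumulators over the flattened word list.
theorem pv_A_split (ss : List String) (tc cc : Int) (wc cwc : PySem.Dict String Int) :
    ss.foldl
      (fun (st : Int × PySem.Dict String Int × Int × PySem.Dict String Int) sentence =>
        let total_cnt := st.1 + 1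
        let class_cnt := st.2.2.1 + 1
        let words := pvWords sentence
        let p := words.foldl
          (fun (p : PySem.Dict String Int × PySem.Dict String Int) word =>
            ((match p.1.get? word with
              | none => p.1.insert word 1
              | some v => p.1.insert word (v + 1)),
             (match p.2.get? word with
              | none => p.2.insert word 1
              | some v => p.2.insert word (v + 1))))
          (st.2.1, st.2.2.2)
        (total_cnt, p.1, class_cnt, p.2)) (tc, wc, cc, cwc)
    = (tc + ss.length,
       (ss.flatMap pvWords).foldl (fun c w => c.insert w (c.getD w 0 + 1)) wc,
       cc + ss.length,
       (ss.flatMap pvWords).foldl (fun c w => c.insert w (c.getD w 0 + 1)) cwc) := by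
  have hfe : (fun (d : PySem.Dict String Int) (w : String) =>
      (match d.get? w with
        | none => d.insert w 1
        | some v => d.insert w (v + 1)))
      = (fun (c : PySem.Dict String Int) w => c.insert w (c.getD w 0 + 1)) :=
    funext fun d => funext fun w => pv_body_eq d w
  induction ss generalizing tc cc wc cwc with
  | nil => simp
  | cons s rest ih =>
    simp only [List.foldl_cons, List.flatMap_cons, List.foldl_append, List.length_cons]
    rw [PySem.List.foldl_prod_mk
          (fun (d : PySem.Dict String Int) (w : String) =>
            (match d.get? w with
              | none => d.insert w 1
              | some v => d.insert w (v + 1)))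
          (fun (d : PySem.Dict String Int) (w : String) =>
            (match d.get? w with
              | none => d.insert w 1
              | some v => d.insert w (v + 1)))]
    rw [hfe, ih]
    simp only [Prod.mk.injEq]
    refine ⟨by push_cast; omega, trivial, by push_cast; omega, trivial⟩

-- B's phase 1 over the flattened word list.
theorem pv_B_split (ss : List String) (n : Int) (c : PySem.Dict String Int) :
    ss.foldl
      (fun (acc : Int × PySem.Dict String Int) sentence =>
        (acc.1 + 1,
         (pvWords sentence).foldl (fun c w => c.insert w (c.getD w 0 + 1)) acc.2))
      (n, c)
    = (n + ss.length, (ss.flatMap pvWords).foldl (fun c w => c.insert w (c.getD w 0 + 1)) c) := by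
  induction ss generalizing n c with
  | nil => simp
  | cons s rest ih =>
    simp only [List.foldl_cons, List.flatMap_cons, List.foldl_append, ih, List.length_cons]
    refine Prod.ext (by push_cast; omega) rfl

theorem pv_update_foldl_add {α : Type} [BEq α] [LawfulBEq α] (xs : List α) (t s : PySem.Set α) :
    PySem.Set.update s (xs.foldl PySem.Set.add t) = PySem.Set.update (PySem.Set.update s t) xs := by
  induction xs generalizing t with
  | nil => simp [PySem.Set.update]
  | cons x xs ih =>
    have hsw : PySem.Set.update s (PySem.Set.add t x) = PySem.Set.add (PySem.Set.update s t) x := by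
      by_cases hx : x ∈ t
      · have hx2 : x ∈ PySem.Set.update s t := (PySem.Set.mem_update s t x).mpr (Or.inr hx)
        rw [PySem.Set.add_of_mem hx, PySem.Set.add_of_mem hx2]
      · rw [PySem.Set.add_of_not_mem hx]
        simp [PySem.Set.update, List.foldl_append, PySem.Set.add]
    simp only [List.foldl_cons]
    rw [ih, hsw]
    simp [PySem.Set.update]

theorem pv_update_ofList {α : Type} [BEq α] [LawfulBEq α] (s : PySem.Set α) (xs : List α) :
    PySem.Set.update s (PySem.Set.ofList xs) = PySem.Set.update s xs := by
  rw [PySem.Set.ofList_eq_foldl, pv_update_foldl_add]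
  rfl

-- getD after merging a keyed map over a Nodup key list.
theorem pv_getD_merge (ks : List String) (hk : ks.Nodup) (cnt : String → Int)
    (d : PySem.Dict String Int) (k : String) :
    ((ks.map (fun a => (a, cnt a))).foldl
        (fun d kv => d.insert kv.1 (d.getD kv.1 0 + kv.2)) d).getD k 0
      = if k ∈ ks then d.getD k 0 + cnt k else d.getD k 0 := by
  induction ks generalizing d with
  | nil => simp
  | cons a ks ih =>
    have ha : a ∉ ks := (List.nodup_cons.mp hk).1
    simp only [List.map_cons, List.foldl_cons]
    rw [ih (List.nodup_cons.mp hk).2]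
    by_cases hka : k = a
    · subst hka
      simp [ha, PySem.Dict.getD_insert_self]
    · rw [PySem.Dict.getD_insert_of_ne _ _ _ hka]
      simp [List.mem_cons, hka]

-- Merging the counter of ws into d equals folding the unit increments of ws over d.
theorem pv_merge_counter (ws : List String) (d : PySem.Dict String Int)
    (hd : d.keys.Nodup) :
    ((ws.foldl (fun c w => c.insert w (c.getD w 0 + 1)) PySem.Dict.empty).items).foldl
        (fun d kv => d.insert kv.1 (d.getD kv.1 0 + kv.2)) d
      = ws.foldl (fun c w => c.insert w (c.getD w 0 + 1)) d := by
  rw [PySem.Dict.foldl_insert_getD_add_one_eq_counter, PySem.Dict.items_counter]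
  have hnodL : (((PySem.Set.ofList ws).map (fun k => (k, (ws.count k : Int)))).foldl
      (fun d kv => d.insert kv.1 (d.getD kv.1 0 + kv.2)) d).keys.Nodup :=
    PySem.Dict.nodup_keys_foldl_insert_key _ Prod.fst
      (fun d kv => d.getD kv.1 0 + kv.2) d hd
  have hnodR : ((ws.foldl (fun c w => c.insert w (c.getD w 0 + 1)) d)).keys.Nodup :=
    PySem.Dict.nodup_keys_foldl_insert ws (fun c w => c.getD w 0 + 1) d hd
  apply PySem.Dict.ext
  rw [PySem.Dict.items_eq_map_keys _ hnodL (0 : Int),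
      PySem.Dict.items_eq_map_keys _ hnodR (0 : Int)]
  have hkeysL : (((PySem.Set.ofList ws).map (fun k => (k, (ws.count k : Int)))).foldl
      (fun d kv => d.insert kv.1 (d.getD kv.1 0 + kv.2)) d).keys
      = PySem.Set.update d.keys ws := by
    rw [PySem.Dict.keys_foldl_insert_key _ Prod.fst
          (fun d kv => d.getD kv.1 0 + kv.2) d]
    rw [List.map_map]
    simp only [Function.comp_def]
    rw [show ((PySem.Set.ofList ws).map (fun k => k)) = PySem.Set.ofList ws from List.map_id' _]
    exact pv_update_ofList d.keys ws
  have hkeysR : ((ws.foldl (fun c w => c.insert w (c.getD w 0 + 1)) d)).keys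
      = PySem.Set.update d.keys ws :=
    PySem.Dict.keys_foldl_insert ws (fun c w => c.getD w 0 + 1) d
  rw [hkeysL, hkeysR]
  apply List.map_congr_left
  intro k _
  rw [pv_getD_merge (PySem.Set.ofList ws) (PySem.Set.nodup_ofList ws)
        (fun k => (ws.count k : Int)) d k,
      PySem.Dict.getD_foldl_insert_add_one]
  by_cases hmem : k ∈ ws
  · simp [(PySem.Set.mem_ofList ws k).mpr hmem]
  · simp [List.count_eq_zero.mpr hmem]

-- ===== VERDICT (by name: the statement is the Claim_ definition above) =====
theorem count_word_and_class_spec : Claim_equal_count_word_and_class := by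
  intro ss tc wc cc cwc _hdom hpre
  unfold Spec_count_word_and_class
  unfold count_word_and_class count_word_and_class_alt
  rw [pv_A_split, pv_B_split]
  have hwc : (PySem.Dict.mk wc).keys.Nodup := by
    simpa [PySem.Dict.keys] using hpre.1
  have hcwc : (PySem.Dict.mk cwc).keys.Nodup := by
    simpa [PySem.Dict.keys] using hpre.2
  dsimp only
  rw [PySem.List.foldl_prod_mk
        (fun (d : PySem.Dict String Int) (kv : String × Int) => d.insert kv.1 (d.getD kv.1 0 + kv.2))
        (fun (d : PySem.Dict String Int) (kv : String × Int) => d.insert kv.1 (d.getD kv.1 0 + kv.2))]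
  rw [pv_merge_counter _ _ hwc, pv_merge_counter _ _ hcwc]
  simp only [Prod.mk.injEq]
  exact ⟨by omega, trivial, by omega, trivial⟩
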